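-- pv_equiv track=rewrite | github.com/endomorphosis/ipfs_datasets_py | ipfs_datasets_py/logic/deontic/prover_syntax.py | _semantic_formula_predicate
-- ===== SOURCE A (Python) =====
-- from typing import Any, Dict, Iterable, List, Sequence
--
-- def _ordered_unique(values: Iterable[Any]) -> List[str]:
--     seen: set[str] = set()
--     result: List[str] = []
--     for value in values:
--         text = str(value or "").strip()
--         if not text or text in seen:
--             continue
--         seen.add(text)
--         result.append(text)
--     return result
--
-- def _semantic_formula_predicate(symbols: Sequence[str]) -> str:
--     ordered_symbols = _ordered_unique(symbols)
--     if not ordered_symbols: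
--         return ""
--
--     frame_predicates = {
--         "AppliesTo",
--         "Definition",
--         "ExemptFrom",
--         "ExpiresAfter",
--         "Lifecycle",
--         "ValidFor",
--     }
--     for symbol in ordered_symbols:
--         if symbol in frame_predicates:
--             return symbol
--     return ordered_symbols[-1]
-- ===== SOURCE B (Python) =====
-- def _semantic_formula_predicate(symbols):
--     frame_predicates = {
--         "AppliesTo",
--         "Definition",
--         "ExemptFrom",
--         "ExpiresAfter",
--         "Lifecycle",
--         "ValidFor",
--     }
--     seen = set()
--     last_unique = ""
--     first_frame = None
--     for value in symbols:
--         text = str(value or "").strip()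
--         if not text or text in seen:
--             continue
--         seen.add(text)
--         last_unique = text
--         if first_frame is None and text in frame_predicates:
--             first_frame = text
--     return first_frame if first_frame is not None else last_unique
-- ===== Notes on version B (the rewrite author's own statement) =====
-- stated objective: simpler
-- what changed: Fused A's two phases (build an ordered-unique list, then rescan it for a frame predicate / take its last element) into one pass over symbols that keeps only a seen-set, the last newly-seen symbol and the first newly-seen frame predicate, so no intermediate list is built.
import Mathlib
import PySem

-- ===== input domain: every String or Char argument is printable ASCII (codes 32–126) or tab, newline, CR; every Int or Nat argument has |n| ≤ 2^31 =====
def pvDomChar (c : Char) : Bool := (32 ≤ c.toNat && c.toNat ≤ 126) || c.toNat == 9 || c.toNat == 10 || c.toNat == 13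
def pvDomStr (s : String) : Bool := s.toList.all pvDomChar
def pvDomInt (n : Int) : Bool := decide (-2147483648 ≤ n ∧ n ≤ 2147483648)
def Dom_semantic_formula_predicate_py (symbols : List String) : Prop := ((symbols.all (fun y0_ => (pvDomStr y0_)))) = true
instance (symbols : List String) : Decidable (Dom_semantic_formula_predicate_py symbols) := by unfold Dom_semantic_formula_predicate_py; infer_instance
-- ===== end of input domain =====

-- B fuses A's two phases (ordered-unique list, then scan) into one pass keeping only a seen-set,
-- the last newly-seen symbol and the first newly-seen frame predicate (objective: simpler).

-- ===== PORT A =====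
-- the frame_predicates set literal (shared constant of both Pythons)
def pvFrame : List String :=
  ["AppliesTo", "Definition", "ExemptFrom", "ExpiresAfter", "Lifecycle", "ValidFor"]

-- loop body of _ordered_unique: state = (seen, result)
def pvStepA (st : PySem.Set String × List String) (value : String) :
    PySem.Set String × List String :=
  let text := PySem.Str.strip value   -- str(value or "").strip() = value.strip() for strings
  if text = "" ∨ PySem.Set.contains st.1 text then st
  else (PySem.Set.add st.1 text, st.2 ++ [text])

def pvOrderedUnique (values : List String) : List String :=
  (values.foldl pvStepA (PySem.Set.empty, [])).2

-- the 'for symbol in ordered_symbols: if symbol in frame_predicates: return symbol' loop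
def pvScanA : List String → Option String
  | [] => none
  | s :: rest => if pvFrame.contains s then some s else pvScanA rest

def semantic_formula_predicate_py (symbols : List String) : String :=
  let ordered := pvOrderedUnique symbols
  if ordered = [] then ""
  else
    match pvScanA ordered with
    | some s => s
    | none => PySem.List.pyGetD ordered (-1) ""   -- ordered_symbols[-1]; exact: ordered ≠ []

-- ===== PORT B =====
-- single-pass loop body: state = (seen, last_unique, first_frame)
def pvStepB (st : PySem.Set String × String × Option String) (value : String) :
    PySem.Set String × String × Option String :=
  let text := PySem.Str.strip value
  if text = "" ∨ PySem.Set.contains st.1 text then st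
  else (PySem.Set.add st.1 text, text,
        if st.2.2 = none ∧ pvFrame.contains text then some text else st.2.2)

def semantic_formula_predicate_py_alt (symbols : List String) : String :=
  let st := symbols.foldl pvStepB (PySem.Set.empty, "", none)
  match st.2.2 with
  | some s => s
  | none => st.2.1

-- ===== PRECONDITION & SPEC =====
def Spec_semantic_formula_predicate_py (symbols : List String) (out : String) : Prop := out = semantic_formula_predicate_py_alt symbols
instance (symbols : List String) (out : String) : Decidable (Spec_semantic_formula_predicate_py symbols out) := by unfold Spec_semantic_formula_predicate_py; infer_instance

-- ===== CLAIM (what is proved, stated in full; the proofs are below) =====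
def Claim_equal_semantic_formula_predicate_py : Prop := ∀ (symbols : List String), Dom_semantic_formula_predicate_py symbols → Spec_semantic_formula_predicate_py symbols (semantic_formula_predicate_py symbols)

-- ===== LEMMAS AND PROOFS =====

-- appending a new symbol to the ordered-unique list updates the first-frame scan as B does
lemma scanA_append (res : List String) (t : String) :
    pvScanA (res ++ [t]) =
      (if pvScanA res = none ∧ pvFrame.contains t then some t else pvScanA res) := by
  induction res with
  | nil => by_cases h : t ∈ pvFrame <;> simp [pvScanA, h]
  | cons s rest ih =>
    by_cases h : s ∈ pvFrame <;> simp [pvScanA, h, ih]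

-- loop invariant: B's fused state tracks A's (seen, result) via getLast?/pvScanA
lemma fold_inv (vals : List String) : ∀ (seen : PySem.Set String) (res : List String),
    List.foldl pvStepB (seen, res.getLast?.getD "", pvScanA res) vals
      = ((List.foldl pvStepA (seen, res) vals).1,
         (List.foldl pvStepA (seen, res) vals).2.getLast?.getD "",
         pvScanA (List.foldl pvStepA (seen, res) vals).2) := by
  induction vals with
  | nil => intro seen res; rfl
  | cons v vs ih =>
    intro seen res
    simp only [List.foldl_cons]
    by_cases h : PySem.Str.strip v = "" ∨ PySem.Set.contains seen (PySem.Str.strip v)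
    · simp only [pvStepA, pvStepB, if_pos h]
      exact ih seen res
    · simp only [pvStepA, pvStepB, if_neg h]
      have := ih (PySem.Set.add seen (PySem.Str.strip v)) (res ++ [PySem.Str.strip v])
      simpa [scanA_append] using this

-- ===== VERDICT (by name: the statement is the Claim_ definition above) =====
theorem semantic_formula_predicate_py_spec : Claim_equal_semantic_formula_predicate_py := by
  intro symbols _
  unfold Spec_semantic_formula_predicate_py semantic_formula_predicate_py
    semantic_formula_predicate_py_alt pvOrderedUnique
  have h := fold_inv symbols PySem.Set.empty []
  simp only [List.getLast?_nil, Option.getD_none, pvScanA] at h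
  rw [h]
  set res := (List.foldl pvStepA (PySem.Set.empty, []) symbols).2 with hres
  by_cases hnil : res = []
  · simp [hnil, pvScanA]
  · simp only [if_neg hnil]
    cases hscan : pvScanA res with
    | some s => simp
    | none =>
      simp only
      rw [PySem.List.pyGetD_neg_one res "" hnil,
          List.getLast?_eq_getLast_of_ne_nil hnil]
      rfl
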